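-- pv_equiv track=rewrite | github.com/RudreshGade/python | seq A/mes.py | MES
-- ===== SOURCE A (Python) =====
-- def mex(S, Q):
--
--     mex = Q
--     while mex in S:
--         mex += 1
--     return mex
--
-- def mexcn(S, Q, n):
--
--     mx = Q
--     skip = n
--     while skip > 0 or mx in S:
--         if mx not in S:
--             skip -= 1
--         mx += 1
--     return mx
--
-- def MES(skipping_sequence, n):
--     A = []
--     B = []
--     MES = []
--     t = 0
--     for i in range(1, n + 1):
--         if t == 0:
--             r = 0
--             t += 1
--         else:
--             r = max(A)
--         an = mex(set(A) | set(B), r + 1)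
--         A.append(an)
--         bn = mexcn(set(A) | set(B), r + 1, skipping_sequence[i - 1])
--         B.append(bn)
--         MES.append(an)
--     return MES
-- ===== SOURCE B (Python) =====
-- def insert_sorted(xs, v):
--     # v not in xs; keep the list sorted ascending
--     return [x for x in xs if x < v] + [v] + [x for x in xs if x >= v]
--
-- def kth_free(blocked, lo, need):
--     # blocked: sorted distinct ints, all >= lo; returns the need-th (need >= 1)
--     # integer >= lo that is not in blocked, by gap arithmetic over the list
--     cur = lo
--     for x in blocked:
--         gap = x - cur
--         if gap >= need:
--             return cur + need - 1
--         need -= gap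
--         cur = x + 1
--     return cur + need - 1
--
-- def MES(skipping_sequence, n):
--     # Sorted list of pending blockers (used values still ahead of the sequence),
--     # lazily pruned; each term is located by gap arithmetic over that list instead
--     # of stepping integer by integer through a membership set.
--     pending = []
--     last = 0
--     out = []
--     for i in range(n):
--         pending = [x for x in pending if x > last]
--         a = kth_free(pending, last + 1, 1)
--         blocked = insert_sorted(pending, a)
--         s = skipping_sequence[i]
--         b = kth_free(blocked, last + 1, (s if s > 0 else 0) + 1)
--         pending = insert_sorted(blocked, b)
--         out.append(a)
--         last = a
--     return out
-- ===== Notes on version B (the rewrite author's own statement) =====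
-- stated objective: faster
-- what changed: B replaces A's per-integer while-scans over a rebuilt membership set by a sorted, lazily pruned list of pending blockers and locates each term by gap arithmetic (kth free >= lo) in one pass over that list, never stepping through skipped integers one by one.
import Mathlib
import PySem

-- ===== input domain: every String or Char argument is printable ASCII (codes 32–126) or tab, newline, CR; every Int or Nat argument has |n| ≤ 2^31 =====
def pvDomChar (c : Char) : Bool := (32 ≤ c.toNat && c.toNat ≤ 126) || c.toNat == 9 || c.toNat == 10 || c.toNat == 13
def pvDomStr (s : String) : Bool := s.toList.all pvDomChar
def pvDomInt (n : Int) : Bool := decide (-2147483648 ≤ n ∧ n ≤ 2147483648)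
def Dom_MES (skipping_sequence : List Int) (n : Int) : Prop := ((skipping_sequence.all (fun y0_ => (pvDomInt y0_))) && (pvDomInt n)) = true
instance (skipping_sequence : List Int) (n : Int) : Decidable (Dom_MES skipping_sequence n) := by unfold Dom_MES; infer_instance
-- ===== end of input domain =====

-- B replaces A's per-integer while-scans over a rebuilt used-set by a sorted, lazily
-- pruned list of pending blockers traversed once with gap arithmetic (objective: faster).

-- ===== PORT A =====
-- 'while mex in S: mex += 1'; the while loop is run on fuel S.length + 1, which always
-- suffices: each recursive step consumes a distinct member of S, so at most S.length steps occur.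
def mexGoA : Nat → List Int → Int → Int
  | 0, _, m => m
  | f+1, S, m => if PySem.Set.contains S m then mexGoA f S (m + 1) else m

def mexA (S : List Int) (Q : Int) : Int := mexGoA (S.length + 1) S Q

-- mexcn's while loop: each step consumes a distinct member of S or (when the current value is
-- free) decrements a positive skip, so fuel skip.toNat + S.length + 1 always suffices.
def mexcnGoA : Nat → List Int → Int → Int → Int
  | 0, _, m, _ => m
  | f+1, S, m, skip =>
    if skip > 0 || PySem.Set.contains S m then
      mexcnGoA f S (m + 1) (if PySem.Set.contains S m then skip else skip - 1)
    else m

def mexcnA (S : List Int) (Q n : Int) : Int := mexcnGoA (n.toNat + S.length + 1) S Q n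

-- the for-loop of A: fuel = remaining trip count, i = the Python loop variable
def MESloop (seq : List Int) : Nat → Int → List Int × List Int × List Int × Int → List Int × List Int × List Int × Int
  | 0, _, st => st
  | f+1, i, (A, B, M, t) =>
    let r := if t = 0 then (0 : Int) else (PySem.List.max? A (fun x => x)).getD 0  -- max(A); A ≠ [] whenever t ≠ 0
    let t' := if t = 0 then t + 1 else t
    let S := PySem.Set.union (PySem.Set.ofList A) B               -- set(A) | set(B)
    let an := mexA S (r + 1)
    let A' := A ++ [an]
    let S2 := PySem.Set.union (PySem.Set.ofList A') B
    let bn := mexcnA S2 (r + 1) (PySem.List.pyGetD seq (i - 1) 0) -- seq[i-1]; in range under Pre_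
    MESloop seq f (i + 1) (A', B ++ [bn], M ++ [an], t')

def MES (skipping_sequence : List Int) (n : Int) : List Int :=
  (MESloop skipping_sequence n.toNat 1 ([], [], [], 0)).2.2.1

-- ===== PORT B =====
-- insert_sorted: the two comprehensions of Source B
def insSorted (xs : List Int) (v : Int) : List Int :=
  xs.filter (fun x => decide (x < v)) ++ v :: xs.filter (fun x => decide (v ≤ x))

-- kth_free: one pass over the sorted blocker list with gap arithmetic
def kthFree : List Int → Int → Int → Int
  | [], cur, need => cur + need - 1
  | x :: t, cur, need =>
    if x - cur ≥ need then cur + need - 1 else kthFree t (x + 1) (need - (x - cur))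

def MESaltLoop (seq : List Int) : Nat → Int → List Int × Int × List Int → List Int × Int × List Int
  | 0, _, st => st
  | f+1, i, (pending, last, out) =>
    let p := pending.filter (fun x => decide (last < x))          -- lazy prune
    let a := kthFree p (last + 1) 1
    let blocked := insSorted p a
    let s := PySem.List.pyGetD seq i 0                            -- seq[i]; in range under Pre_
    let b := kthFree blocked (last + 1) ((if s > 0 then s else 0) + 1)
    MESaltLoop seq f (i + 1) (insSorted blocked b, a, out ++ [a])

def MES_alt (skipping_sequence : List Int) (n : Int) : List Int :=
  (MESaltLoop skipping_sequence n.toNat 0 ([], 0, [])).2.2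

-- ===== PRECONDITION & SPEC =====
-- A indexes skipping_sequence[i-1] for i = 1..n, so it raises IndexError when the list is
-- shorter than n; Pre_ excludes exactly those inputs (for n ≤ 0 the loop body never runs).
def Pre_MES (skipping_sequence : List Int) (n : Int) : Prop := n ≤ (skipping_sequence.length : Int)
instance (skipping_sequence : List Int) (n : Int) : Decidable (Pre_MES skipping_sequence n) := by unfold Pre_MES; infer_instance
def pvWitness_MES : List Int × Int := ([2, 0, 3, 1], 4)

def Spec_MES (skipping_sequence : List Int) (n : Int) (out : List Int) : Prop := out = MES_alt skipping_sequence n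
instance (skipping_sequence : List Int) (n : Int) (out : List Int) : Decidable (Spec_MES skipping_sequence n out) := by unfold Spec_MES; infer_instance

-- ===== CLAIM (what is proved, stated in full; the proofs are below) =====
def Claim_equal_MES : Prop := ∀ (skipping_sequence : List Int) (n : Int), Dom_MES skipping_sequence n → Pre_MES skipping_sequence n → Spec_MES skipping_sequence n (MES skipping_sequence n)

-- ===== LEMMAS AND PROOFS =====

lemma contains_eq_decide (S : List Int) (m : Int) :
    PySem.Set.contains S m = decide (m ∈ S) := by
  by_cases h : m ∈ S
  · simp [h, (PySem.Set.contains_iff S m).mpr h]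
  · cases hS : PySem.Set.contains S m
    · simp [h]
    · exact absurd ((PySem.Set.contains_iff S m).mp hS) h

-- number of integers in [q, q+m) that are NOT in S
def cntF (S : List Int) : Int → Nat → Nat
  | _, 0 => 0
  | q, m+1 => (if q ∈ S then 0 else 1) + cntF S (q + 1) m

lemma cntF_nil : ∀ (q : Int) (m : Nat), cntF [] q m = m := by
  intro q m
  induction m generalizing q with
  | zero => rfl
  | succ m ih => simp [cntF, ih]; omega

lemma cntF_split (S : List Int) (m1 m2 : Nat) : ∀ (q : Int),
    cntF S q (m1 + m2) = cntF S q m1 + cntF S (q + m1) m2 := by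
  induction m1 with
  | zero => intro q; simp [cntF]
  | succ m1 ih =>
    intro q
    have h : m1 + 1 + m2 = (m1 + m2) + 1 := by omega
    rw [h]
    simp only [cntF, ih (q + 1)]
    have h2 : q + 1 + (m1 : Int) = q + ((m1 : Nat) + 1 : Nat) := by push_cast; ring
    rw [h2]
    omega

lemma cntF_congr (S T : List Int) : ∀ (q : Int) (m : Nat),
    (∀ y : Int, q ≤ y → y < q + m → (y ∈ S ↔ y ∈ T)) → cntF S q m = cntF T q m := by
  intro q m
  induction m generalizing q with
  | zero => intro _; rfl
  | succ m ih =>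
    intro h
    have hq := h q (le_refl q) (by push_cast; omega)
    have ht := ih (q + 1) (fun y h1 h2 => h y (by omega) (by push_cast at h2 ⊢; omega))
    simp only [cntF, ht]
    by_cases hm : q ∈ S
    · simp [hm, hq.mp hm]
    · have : q ∉ T := fun hT => hm (hq.mpr hT)
      simp [hm, this]

lemma cntF_free (S : List Int) : ∀ (q : Int) (m : Nat),
    (∀ y : Int, q ≤ y → y < q + m → y ∉ S) → cntF S q m = m := by
  intro q m
  induction m generalizing q with
  | zero => intro _; rfl
  | succ m ih =>
    intro h
    have hq : q ∉ S := h q (le_refl q) (by push_cast; omega)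
    have ht := ih (q + 1) (fun y h1 h2 => h y (by omega) (by push_cast at h2 ⊢; omega))
    simp [cntF, hq, ht]; omega

lemma cntF_zero_mem (S : List Int) : ∀ (q : Int) (m : Nat), cntF S q m = 0 →
    ∀ y : Int, q ≤ y → y < q + m → y ∈ S := by
  intro q m
  induction m generalizing q with
  | zero => intro _ y h1 h2; push_cast at h2; omega
  | succ m ih =>
    intro h y h1 h2
    by_cases hq : q ∈ S
    · simp only [cntF, hq, if_pos, Nat.zero_add] at h
      rcases eq_or_lt_of_le h1 with rfl | hlt
      · exact hq
      · exact ih (q + 1) (by simpa using h) y (by omega) (by push_cast at h2 ⊢; omega)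
    · simp [cntF, hq] at h

-- pigeonhole: in any window of m consecutive integers, the blocked ones (members of a
-- duplicate-free S) number at most S.length
lemma blocked_le_length (m : Nat) : ∀ (S : List Int) (q : Int), S.Nodup →
    m ≤ cntF S q m + S.length := by
  induction m with
  | zero => intro S q _; omega
  | succ m ih =>
    intro S q hnd
    by_cases hq : q ∈ S
    · have hcongr : cntF S (q + 1) m = cntF (S.erase q) (q + 1) m := by
        apply cntF_congr
        intro y h1 _
        have hy : y ≠ q := by omega
        constructor
        · intro hS; exact (List.mem_erase_of_ne hy).mpr hS
        · intro hS; exact (List.mem_erase_of_ne hy).mp hS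
      have hlen : (S.erase q).length + 1 = S.length := by
        rw [List.length_erase_of_mem hq]
        have : 0 < S.length := List.length_pos_of_mem hq
        omega
      have := ih (S.erase q) (q + 1) (hnd.erase q)
      simp only [cntF, hq, if_pos]
      omega
    · have := ih S (q + 1) hnd
      simp only [cntF, hq, if_neg, not_false_iff]
      omega

-- the A-side while loops compute the value characterised by "free, with exactly
-- skip.toNat free values passed", provided the fuel exceeds the distance travelled
lemma mexGoA_eq (S : List Int) : ∀ (f : Nat) (q r : Int), q ≤ r → r ∉ S →
    (∀ y : Int, q ≤ y → y < r → y ∈ S) → (r - q).toNat < f → mexGoA f S q = r := by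
  intro f
  induction f with
  | zero => intro q r _ _ _ h4; omega
  | succ f ih =>
    intro q r h1 h2 h3 h4
    rcases eq_or_lt_of_le h1 with rfl | hlt
    · simp [mexGoA, contains_eq_decide, h2]
    · have hq : q ∈ S := h3 q (le_refl q) hlt
      simp only [mexGoA, contains_eq_decide, hq, decide_true, if_pos]
      exact ih (q + 1) r (by omega) h2 (fun y hy1 hy2 => h3 y (by omega) hy2) (by omega)

lemma mexcnGoA_eq (S : List Int) : ∀ (f : Nat) (q skip r : Int), q ≤ r → r ∉ S →
    cntF S q (r - q).toNat = skip.toNat → (r - q).toNat < f → mexcnGoA f S q skip = r := by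
  intro f
  induction f with
  | zero => intro q skip r _ _ _ h4; omega
  | succ f ih =>
    intro q skip r h1 h2 h3 h4
    rcases eq_or_lt_of_le h1 with rfl | hlt
    · have hz : (q - q).toNat = 0 := by omega
      rw [hz] at h3
      simp only [cntF] at h3
      have hskip : ¬ skip > 0 := by omega
      simp [mexcnGoA, contains_eq_decide, h2, hskip]
    · have hsplit : (r - q).toNat = 1 + (r - (q + 1)).toNat := by omega
      rw [hsplit, cntF_split] at h3
      simp only [cntF, Nat.cast_one] at h3
      by_cases hq : q ∈ S
      · simp only [hq, if_true, Nat.zero_add, Nat.add_zero] at h3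
        simp only [mexcnGoA, contains_eq_decide, hq, decide_true, Bool.or_true, if_true]
        exact ih (q + 1) skip r (by omega) h2 h3 (by omega)
      · simp only [hq, if_false, Nat.add_zero] at h3
        have hpos : skip > 0 := by omega
        simp only [mexcnGoA, contains_eq_decide, hq, decide_false, Bool.or_false, hpos,
          decide_true, if_true]
        exact ih (q + 1) (skip - 1) r (by omega) h2 (by omega) (by omega)

-- correctness of B's gap walk: on a sorted duplicate-free blocker list whose elements
-- all lie at or above lo, kthFree returns the need-th free integer ≥ lo
lemma kthFree_spec : ∀ (xs : List Int) (lo need : Int), xs.Pairwise (· < ·) →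
    (∀ x ∈ xs, lo ≤ x) → 1 ≤ need →
    lo ≤ kthFree xs lo need ∧ kthFree xs lo need ∉ xs ∧
      cntF xs lo ((kthFree xs lo need - lo).toNat) = (need - 1).toNat := by
  intro xs
  induction xs with
  | nil =>
    intro lo need _ _ hneed
    refine ⟨by simp [kthFree]; omega, by simp [kthFree], ?_⟩
    rw [cntF_nil]
    simp only [kthFree]
    omega
  | cons x t ih =>
    intro lo need hpair hlo hneed
    have hxlo : lo ≤ x := hlo x (by simp)
    have hxt : ∀ y ∈ t, x < y := by
      intro y hy; exact (List.pairwise_cons.mp hpair).1 y hy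
    by_cases hgap : x - lo ≥ need
    · have hr : kthFree (x :: t) lo need = lo + need - 1 := by simp [kthFree, hgap]
      refine ⟨by omega, ?_, ?_⟩
      · rw [hr]
        simp only [List.mem_cons, not_or]
        refine ⟨by omega, fun hmem => ?_⟩
        have := hxt _ hmem; omega
      · rw [hr]
        have hfree : ∀ y : Int, lo ≤ y → y < lo + ((need - 1).toNat : Nat) → y ∉ (x :: t) := by
          intro y h1 h2 hmem
          have hyx : y < x := by push_cast at h2; omega
          rcases List.mem_cons.mp hmem with rfl | hmt
          · omega
          · have := hxt _ hmt; omega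
        rw [show (lo + need - 1 - lo).toNat = (need - 1).toNat from by omega]
        exact cntF_free _ _ _ hfree
    · have hr : kthFree (x :: t) lo need = kthFree t (x + 1) (need - (x - lo)) := by
        simp [kthFree, hgap]
      have hpair' : t.Pairwise (· < ·) := (List.pairwise_cons.mp hpair).2
      have hlo' : ∀ y ∈ t, x + 1 ≤ y := fun y hy => by have := hxt y hy; omega
      have hneed' : 1 ≤ need - (x - lo) := by omega
      obtain ⟨h1, h2, h3⟩ := ih (x + 1) (need - (x - lo)) hpair' hlo' hneed'
      rw [hr]
      set r := kthFree t (x + 1) (need - (x - lo)) with hrdef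
      refine ⟨by omega, ?_, ?_⟩
      · simp only [List.mem_cons, not_or]
        exact ⟨by omega, h2⟩
      · have hm : (r - lo).toNat = ((x - lo).toNat + 1) + (r - (x + 1)).toNat := by omega
        rw [hm, cntF_split, cntF_split]
        have e1 : cntF (x :: t) lo ((x - lo).toNat) = (x - lo).toNat := by
          apply cntF_free
          intro y hy1 hy2 hmem
          have hyx : y < x := by push_cast at hy2; omega
          rcases List.mem_cons.mp hmem with rfl | hmt
          · omega
          · have := hxt _ hmt; omega
        have e2 : cntF (x :: t) (lo + ((x - lo).toNat : Nat)) 1 = 0 := by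
          rw [show (lo + ((x - lo).toNat : Nat) : Int) = x from by push_cast; omega]
          simp [cntF]
        have e3 : cntF (x :: t) (lo + (((x - lo).toNat + 1 : Nat) : Nat)) ((r - (x + 1)).toNat)
            = cntF t (x + 1) ((r - (x + 1)).toNat) := by
          rw [show (lo + (((x - lo).toNat + 1 : Nat) : Nat) : Int) = x + 1 from by omega]
          apply cntF_congr
          intro y hy1 _
          simp only [List.mem_cons]
          constructor
          · rintro (rfl | h) <;> [omega; exact h]
          · exact Or.inr
        rw [e1, e2, e3, h3]
        omega

lemma mem_insSorted (xs : List Int) (v y : Int) :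
    y ∈ insSorted xs v ↔ y ∈ xs ∨ y = v := by
  simp only [insSorted, List.mem_append, List.mem_cons, List.mem_filter,
    decide_eq_true_eq]
  constructor
  · rintro (⟨h, _⟩ | rfl | ⟨h, _⟩)
    · exact Or.inl h
    · exact Or.inr rfl
    · exact Or.inl h
  · rintro (h | rfl)
    · by_cases hv : y < v
      · exact Or.inl ⟨h, hv⟩
      · exact Or.inr (Or.inr ⟨h, by omega⟩)
    · exact Or.inr (Or.inl rfl)

lemma pairwise_insSorted (xs : List Int) (v : Int) (hpair : xs.Pairwise (· < ·))
    (hv : v ∉ xs) : (insSorted xs v).Pairwise (· < ·) := by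
  have h1 : (xs.filter (fun x => decide (x < v))).Pairwise (· < ·) :=
    List.Pairwise.sublist List.filter_sublist hpair
  have h2 : (xs.filter (fun x => decide (v ≤ x))).Pairwise (· < ·) :=
    List.Pairwise.sublist List.filter_sublist hpair
  rw [insSorted, List.pairwise_append]
  refine ⟨h1, List.pairwise_cons.mpr ⟨?_, h2⟩, ?_⟩
  · intro y hy
    have := List.mem_filter.mp hy
    have hvy : v ≤ y := by simpa using this.2
    have hne : y ≠ v := fun h => hv (h ▸ this.1)
    omega
  · intro a ha b hb
    have hav : a < v := by simpa using (List.mem_filter.mp ha).2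
    rcases List.mem_cons.mp hb with rfl | hbt
    · exact hav
    · have hvb : v ≤ b := by simpa using (List.mem_filter.mp hbt).2
      omega

-- appending a strict upper bound moves max(A) to it
lemma max?_append_gt (A : List Int) (last a : Int)
    (h : A = [] ∨ (PySem.List.max? A (fun x => x) = some last ∧ last < a)) :
    PySem.List.max? (A ++ [a]) (fun x => x) = some a := by
  rcases h with h | ⟨h, hlt⟩
  · subst h; simp [PySem.List.max?_id_cons]
  · rcases A with _ | ⟨x, t⟩
    · simp [PySem.List.max?] at h
    · rw [PySem.List.max?_id_cons] at h
      have hfold : t.foldl max x = last := by simpa using h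
      rw [List.cons_append, PySem.List.max?_id_cons, List.foldl_append]
      simp [hfold, max_eq_right (le_of_lt hlt)]

-- the loop invariant tying A's state (A, B, M, t) to B's state (pending, last, out):
-- above 'last', the pending list carries exactly the used values, in sorted order
def MESRel (A B M : List Int) (t : Int) (pending : List Int) (last : Int) (out : List Int) : Prop :=
  M = out ∧ pending.Pairwise (· < ·) ∧
  (∀ x : Int, last < x → (x ∈ pending ↔ x ∈ A ∨ x ∈ B)) ∧
  (A = [] → t = 0 ∧ last = 0) ∧
  (A ≠ [] → t ≠ 0 ∧ PySem.List.max? A (fun x => x) = some last)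

lemma loop_eq (seq : List Int) : ∀ (f : Nat) (i : Int) (A B M : List Int) (t : Int)
    (pending : List Int) (last : Int) (out : List Int), MESRel A B M t pending last out →
    (MESloop seq f i (A, B, M, t)).2.2.1 = (MESaltLoop seq f (i - 1) (pending, last, out)).2.2 := by
  intro f
  induction f with
  | zero => intro i A B M t pending last out hRel; exact hRel.1
  | succ f ih =>
    intro i A B M t pending last out hRel
    obtain ⟨hM, hpair, hmem, hnil, hcons⟩ := hRel
    -- r = last
    have hr : (if t = 0 then (0 : Int) else (PySem.List.max? A (fun x => x)).getD 0) = last := by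
      by_cases hA : A = []
      · obtain ⟨ht, hl⟩ := hnil hA; simp [ht, hl]
      · obtain ⟨ht, hm⟩ := hcons hA; simp [ht, hm]
    have ht' : (if t = 0 then t + 1 else t) ≠ 0 := by
      by_cases hA : A = []
      · simp [(hnil hA).1]
      · simp [(hcons hA).1]
    set lo := last + 1 with hlodef
    -- the pruned pending list p
    set p := pending.filter (fun x => decide (last < x)) with hpdef
    have hp_pair : p.Pairwise (· < ·) := List.Pairwise.sublist List.filter_sublist hpair
    have hp_mem : ∀ x : Int, x ∈ p ↔ x ∈ pending ∧ last < x := by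
      intro x; simp [hpdef, List.mem_filter]
    have hp_used : ∀ x : Int, x ∈ p ↔ (x ∈ A ∨ x ∈ B) ∧ last < x := by
      intro x
      rw [hp_mem x]
      constructor
      · rintro ⟨h1, h2⟩; exact ⟨(hmem x h2).mp h1, h2⟩
      · rintro ⟨h1, h2⟩; exact ⟨(hmem x h2).mpr h1, h2⟩
    have hp_lo : ∀ x ∈ p, lo ≤ x := by
      intro x hx; have := (hp_mem x).mp hx; omega
    -- the first set and a
    set S := PySem.Set.union (PySem.Set.ofList A) B with hS
    have hS_mem : ∀ x : Int, x ∈ S ↔ x ∈ A ∨ x ∈ B := by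
      intro x; rw [hS, PySem.Set.mem_union, PySem.Set.mem_ofList]
    have hS_nd : S.Nodup := PySem.Set.nodup_union _ _ (PySem.Set.nodup_ofList _)
    have hSp : ∀ y : Int, lo ≤ y → (y ∈ S ↔ y ∈ p) := by
      intro y hy
      rw [hS_mem y, hp_used y]
      constructor
      · intro h; exact ⟨h, by omega⟩
      · rintro ⟨h, _⟩; exact h
    set a := kthFree p lo 1 with hadef
    obtain ⟨ha1, ha2, ha3⟩ := kthFree_spec p lo 1 hp_pair hp_lo (by omega)
    have ha3' : cntF p lo ((a - lo).toNat) = 0 := by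
      have : ((1 : Int) - 1).toNat = 0 := by omega
      rw [← hadef] at ha3; omega
    have haS : a ∉ S := fun h => ha2 ((hSp a ha1).mp h)
    have haMex : mexA S lo = a := by
      have hall : ∀ y : Int, lo ≤ y → y < a → y ∈ S := by
        intro y h1 h2
        exact (hSp y h1).mpr (cntF_zero_mem p lo _ ha3' y h1 (by omega))
      apply mexGoA_eq S (S.length + 1) lo a ha1 haS hall
      have hc : cntF S lo ((a - lo).toNat) = cntF p lo ((a - lo).toNat) := by
        apply cntF_congr
        intro y h1 _
        exact hSp y h1
      have := blocked_le_length ((a - lo).toNat) S lo hS_nd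
      omega
    -- blocked and b
    set blocked := insSorted p a with hbldef
    have hbl_pair : blocked.Pairwise (· < ·) := pairwise_insSorted p a hp_pair ha2
    have hbl_mem : ∀ x : Int, x ∈ blocked ↔ x ∈ p ∨ x = a := fun x => mem_insSorted p a x
    have hbl_lo : ∀ x ∈ blocked, lo ≤ x := by
      intro x hx
      rcases (hbl_mem x).mp hx with h | rfl
      · exact hp_lo x h
      · exact ha1
    set S2 := PySem.Set.union (PySem.Set.ofList (A ++ [a])) B with hS2
    have hS2_mem : ∀ x : Int, x ∈ S2 ↔ (x ∈ A ∨ x = a) ∨ x ∈ B := by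
      intro x
      rw [hS2, PySem.Set.mem_union, PySem.Set.mem_ofList, List.mem_append]
      simp
    have hS2_nd : S2.Nodup := PySem.Set.nodup_union _ _ (PySem.Set.nodup_ofList _)
    have hS2bl : ∀ y : Int, lo ≤ y → (y ∈ S2 ↔ y ∈ blocked) := by
      intro y hy
      rw [hS2_mem y, hbl_mem y, hp_used y]
      constructor
      · rintro ((h | rfl) | h)
        · exact Or.inl ⟨Or.inl h, by omega⟩
        · exact Or.inr rfl
        · exact Or.inl ⟨Or.inr h, by omega⟩
      · rintro (⟨h, _⟩ | rfl)
        · rcases h with h | h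
          · exact Or.inl (Or.inl h)
          · exact Or.inr h
        · exact Or.inl (Or.inr rfl)
    set sk := PySem.List.pyGetD seq (i - 1) 0 with hskdef
    set need := (if sk > 0 then sk else 0) + 1 with hneeddef
    have hneed1 : 1 ≤ need := by rw [hneeddef]; split <;> omega
    have hneedtn : (need - 1).toNat = sk.toNat := by rw [hneeddef]; split <;> omega
    set b := kthFree blocked lo need with hbdef
    obtain ⟨hb1, hb2, hb3⟩ := kthFree_spec blocked lo need hbl_pair hbl_lo hneed1
    rw [← hbdef] at hb1 hb2 hb3
    rw [hneedtn] at hb3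
    have hbS2 : b ∉ S2 := fun h => hb2 ((hS2bl b hb1).mp h)
    have hbMexcn : mexcnA S2 lo sk = b := by
      have hc : cntF S2 lo ((b - lo).toNat) = cntF blocked lo ((b - lo).toNat) := by
        apply cntF_congr
        intro y h1 _
        exact hS2bl y h1
      apply mexcnGoA_eq S2 (sk.toNat + S2.length + 1) lo sk b hb1 hbS2 (by omega)
      have := blocked_le_length ((b - lo).toNat) S2 lo hS2_nd
      omega
    -- one step of each loop
    show (MESloop seq (f + 1) i (A, B, M, t)).2.2.1 = _
    simp only [MESloop, MESaltLoop, hr]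
    rw [← hlodef, ← hpdef, ← hS, ← hadef, haMex, ← hskdef, ← hneeddef, ← hbldef,
      ← hbdef, ← hS2, hbMexcn]
    -- re-establish the invariant
    have hinv : MESRel (A ++ [a]) (B ++ [b]) (M ++ [a]) (if t = 0 then t + 1 else t)
        (insSorted blocked b) a (out ++ [a]) := by
      refine ⟨by rw [hM], pairwise_insSorted blocked b hbl_pair hb2, ?_, by simp,
        fun _ => ⟨ht', ?_⟩⟩
      · intro x hx
        rw [mem_insSorted, hbl_mem, hp_used]
        simp only [List.mem_append, List.mem_singleton]
        constructor
        · rintro ((⟨h, _⟩ | rfl) | rfl)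
          · rcases h with h | h
            · exact Or.inl (Or.inl h)
            · exact Or.inr (Or.inl h)
          · omega
          · exact Or.inr (Or.inr rfl)
        · rintro ((h | rfl) | (h | rfl))
          · exact Or.inl (Or.inl ⟨Or.inl h, by omega⟩)
          · omega
          · exact Or.inl (Or.inl ⟨Or.inr h, by omega⟩)
          · exact Or.inr rfl
      · apply max?_append_gt A last a
        by_cases hA : A = []
        · exact Or.inl hA
        · exact Or.inr ⟨(hcons hA).2, by omega⟩
    have hfin := ih (i + 1) _ _ _ _ _ _ _ hinv
    have he : i + 1 - 1 = i - 1 + 1 := by ring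
    rw [he] at hfin
    exact hfin

-- ===== VERDICT (by name: the statement is the Claim_ definition above) =====
theorem MES_spec : Claim_equal_MES := by
  intro seq n _ _
  show MES seq n = MES_alt seq n
  unfold MES MES_alt
  have h := loop_eq seq n.toNat 1 [] [] [] 0 [] 0 []
    ⟨rfl, List.Pairwise.nil, by simp, fun _ => ⟨rfl, rfl⟩, fun h => absurd rfl h⟩
  simpa using h
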